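-- pv_equiv track=rewrite | github.com/paiml/depyler | examples/hard_numeric_rk4.py | rk4_linear
-- ===== SOURCE A (Python) =====
-- def rk4_linear(slope: int, y0: int, steps: int, h: int) -> int:
--     """RK4 for dy/dx = slope (constant). Exact for any h.
--     Returns y after 'steps' steps of size h."""
--     y: int = y0
--     i: int = 0
--     while i < steps:
--         k1: int = slope * h
--         k2: int = slope * h
--         k3: int = slope * h
--         k4: int = slope * h
--         y = y + (k1 + 2 * k2 + 2 * k3 + k4) // 6
--         i = i + 1
--     return y
-- ===== SOURCE B (Python) =====
-- def rk4_linear(slope: int, y0: int, steps: int, h: int) -> int: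
--     """Closed form: each RK4 step of dy/dx = slope adds exactly slope*h."""
--     return y0 + max(steps, 0) * slope * h
-- ===== Notes on version B (the rewrite author's own statement) =====
-- stated objective: faster
-- what changed: Replaced the step-by-step loop (whose every iteration adds exactly slope*h, since (6*slope*h)//6 == slope*h) by the closed form y0 + max(steps,0)*slope*h.
import Mathlib
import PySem

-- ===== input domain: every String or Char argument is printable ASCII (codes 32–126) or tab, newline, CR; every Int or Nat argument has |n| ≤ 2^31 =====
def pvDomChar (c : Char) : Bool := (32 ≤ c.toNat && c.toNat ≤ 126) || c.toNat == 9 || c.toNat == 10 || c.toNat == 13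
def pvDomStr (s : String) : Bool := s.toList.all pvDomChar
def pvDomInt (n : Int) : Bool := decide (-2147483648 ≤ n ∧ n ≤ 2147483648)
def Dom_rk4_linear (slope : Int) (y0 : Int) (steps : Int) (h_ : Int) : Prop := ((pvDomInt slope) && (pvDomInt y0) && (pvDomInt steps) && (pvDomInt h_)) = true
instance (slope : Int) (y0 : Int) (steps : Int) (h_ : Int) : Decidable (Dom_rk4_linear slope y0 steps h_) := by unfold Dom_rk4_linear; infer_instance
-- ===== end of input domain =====

-- B replaces the O(steps) loop by the closed form y0 + max(steps,0)*slope*h (each step adds exactly slope*h): asymptotically faster.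


-- ===== PORT A =====
-- while i < steps: four stages k1..k4 = slope*h_, y += (k1+2*k2+2*k3+k4)//6
def rk4_loop (slope : Int) (h_ : Int) : Nat → Int → Int
  | 0, y => y
  | n + 1, y =>
    let k1 := slope * h_
    let k2 := slope * h_
    let k3 := slope * h_
    let k4 := slope * h_
    rk4_loop slope h_ n (y + PySem.Int.floordiv (k1 + 2 * k2 + 2 * k3 + k4) 6)

def rk4_linear (slope : Int) (y0 : Int) (steps : Int) (h_ : Int) : Int :=
  rk4_loop slope h_ steps.toNat y0

-- ===== PORT B =====
def rk4_linear_alt (slope : Int) (y0 : Int) (steps : Int) (h_ : Int) : Int :=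
  y0 + max steps 0 * slope * h_

-- ===== PRECONDITION & SPEC =====
def Spec_rk4_linear (slope : Int) (y0 : Int) (steps : Int) (h_ : Int) (out : Int) : Prop := out = rk4_linear_alt slope y0 steps h_
instance (slope : Int) (y0 : Int) (steps : Int) (h_ : Int) (out : Int) : Decidable (Spec_rk4_linear slope y0 steps h_ out) := by unfold Spec_rk4_linear; infer_instance

-- ===== CLAIM (what is proved, stated in full; the proofs are below) =====
def Claim_equal_rk4_linear : Prop := ∀ (slope : Int) (y0 : Int) (steps : Int) (h_ : Int), Dom_rk4_linear slope y0 steps h_ → Spec_rk4_linear slope y0 steps h_ (rk4_linear slope y0 steps h_)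

-- ===== LEMMAS AND PROOFS =====

-- ===== VERDICT (by name: the statement is the Claim_ definition above) =====
theorem rk4_loop_eq (slope h_ : Int) (n : Nat) (y : Int) :
    rk4_loop slope h_ n y = y + n * (slope * h_) := by
  induction n generalizing y with
  | zero => simp [rk4_loop]
  | succ n ih =>
    have h6 : (slope * h_ + 2 * (slope * h_) + 2 * (slope * h_) + slope * h_)
        = 6 * (slope * h_) := by ring
    simp only [rk4_loop, ih, h6, Int.mul_fdiv_cancel_left _ (by norm_num : (6:Int) ≠ 0),
      PySem.Int.floordiv]
    push_cast
    ring

theorem rk4_linear_spec : Claim_equal_rk4_linear := by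
  intro slope y0 steps h_ _
  unfold Spec_rk4_linear rk4_linear rk4_linear_alt
  rw [rk4_loop_eq]
  have : ((steps.toNat : Int)) = max steps 0 := by omega
  rw [this]; ring
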